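-- pv_equiv track=rewrite | github.com/JadenHeo/PS-Study | Programmers/Lv2_짝지어 제거하기.py | solution
-- ===== SOURCE A (Python) =====
-- def solution(s):
--     stack = []
--     for alphabet in s:
--         if not stack:
--             stack.append(alphabet)
--         elif alphabet == stack[-1]:
--             stack.pop()
--         else:
--             stack.append(alphabet)
--     return 0 if stack else 1
-- ===== SOURCE B (Python) =====
-- def solution(s):
--     while True:
--         kept = []
--         i = 0
--         n = len(s)
--         while i < n:
--             if i + 1 < n and s[i] == s[i + 1]:
--                 i += 2
--             else:
--                 kept.append(s[i])
--                 i += 1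
--         t = ''.join(kept)
--         if len(t) == len(s):
--             break
--         s = t
--     return 0 if s else 1
-- ===== Notes on version B (the rewrite author's own statement) =====
-- stated objective: alternative
-- what changed: B repeatedly sweeps the whole string, each sweep deleting every greedily-found adjacent equal pair, until a sweep removes nothing, instead of A's single left-to-right stack pass; equivalence rests on confluence of adjacent-pair removal.
import Mathlib
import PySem

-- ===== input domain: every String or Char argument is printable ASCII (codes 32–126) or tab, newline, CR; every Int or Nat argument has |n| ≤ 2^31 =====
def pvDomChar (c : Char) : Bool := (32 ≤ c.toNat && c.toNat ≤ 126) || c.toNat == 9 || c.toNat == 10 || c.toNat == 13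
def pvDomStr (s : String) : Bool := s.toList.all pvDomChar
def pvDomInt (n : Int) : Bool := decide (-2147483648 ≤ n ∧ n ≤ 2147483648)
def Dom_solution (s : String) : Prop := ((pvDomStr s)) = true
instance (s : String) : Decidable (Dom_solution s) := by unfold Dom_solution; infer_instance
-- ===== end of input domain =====

-- B replaces A's single stack pass by repeated whole-string sweeps, each deleting the greedily-found adjacent equal pairs, until a sweep removes nothing; same return value.

-- ===== PORT A =====
-- one step of A's loop: Python stack is a list whose top is its LAST element
def stepA (stack : List Char) (c : Char) : List Char :=
  if stack = [] then stack ++ [c]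
  else if c = stack.getLast! then stack.dropLast
  else stack ++ [c]

def solution (s : String) : Int :=
  let stack := s.toList.foldl stepA []
  if stack ≠ [] then 0 else 1

-- ===== PORT B =====
-- one sweep of B's inner while loop: keep s[i] unless s[i]=s[i+1], in which case skip both
def passOnce : List Char → List Char
  | a :: b :: t => if a = b then passOnce t else a :: passOnce (b :: t)
  | l => l

theorem passOnce_length_le : ∀ (l : List Char), (passOnce l).length ≤ l.length := by
  intro l
  fun_induction passOnce with
  | case1 b t ih => simp only [List.length_cons]; omega
  | case2 a b t hab ih => simp only [List.length_cons] at *; omega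
  | case3 l h => exact Nat.le_refl _

-- B's outer while loop: sweep until a sweep removes nothing
def reduceAll (l : List Char) : List Char :=
  if (passOnce l).length = l.length then l else reduceAll (passOnce l)
termination_by l.length
decreasing_by
  have := passOnce_length_le l; omega

def solution_alt (s : String) : Int :=
  if reduceAll s.toList ≠ [] then 0 else 1

-- ===== PRECONDITION & SPEC =====
def Spec_solution (s : String) (out : Int) : Prop := out = solution_alt s
instance (s : String) (out : Int) : Decidable (Spec_solution s out) := by unfold Spec_solution; infer_instance

-- ===== CLAIM (what is proved, stated in full; the proofs are below) =====
def Claim_equal_solution : Prop := ∀ (s : String), Dom_solution s → Spec_solution s (solution s)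

-- ===== LEMMAS AND PROOFS =====

-- proof-side stack with the top at the HEAD (reverse of A's representation)
def stepR (r : List Char) (c : Char) : List Char :=
  if r = [] then [c]
  else if c = r.head! then r.tail
  else c :: r

theorem stepA_eq_stepR (r : List Char) (c : Char) : stepA r.reverse c = (stepR r c).reverse := by
  cases r with
  | nil => simp [stepA, stepR]
  | cons h t =>
    by_cases hc : c = h
    · simp [stepA, stepR, hc]
    · simp [stepA, stepR, hc]

theorem foldA_eq_foldR (l : List Char) : ∀ (r : List Char),
    l.foldl stepA r.reverse = (l.foldl stepR r).reverse := by
  induction l with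
  | nil => intro r; simp
  | cons c t ih =>
    intro r
    simp only [List.foldl_cons, stepA_eq_stepR]
    exact ih (stepR r c)

-- the reversed stack never contains two adjacent equal characters
theorem stepR_chain {r : List Char} (hr : r.IsChain (· ≠ ·)) (c : Char) :
    (stepR r c).IsChain (· ≠ ·) := by
  cases r with
  | nil => simp [stepR, List.isChain_singleton]
  | cons h t =>
    by_cases hc : c = h
    · simpa [stepR, hc] using hr.tail
    · simp only [stepR, if_neg (List.cons_ne_nil h t), List.head!_cons, if_neg hc]
      exact List.isChain_cons_cons.mpr ⟨hc, hr⟩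

-- pushing the same character twice onto a reduced stack is the identity
theorem stepR_pair {r : List Char} (hr : r.IsChain (· ≠ ·)) (c : Char) :
    stepR (stepR r c) c = r := by
  cases r with
  | nil => simp [stepR]
  | cons h t =>
    by_cases hc : c = h
    · subst hc
      cases t with
      | nil => simp [stepR]
      | cons h2 t2 =>
        have hne : c ≠ h2 := List.rel_of_isChain_cons_cons hr
        simp [stepR, hne]
    · simp [stepR, hc]

-- one sweep does not change the stack fold (from a reduced stack)
theorem foldR_passOnce : ∀ (l r : List Char), r.IsChain (· ≠ ·) →
    l.foldl stepR r = (passOnce l).foldl stepR r := by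
  intro l
  fun_induction passOnce with
  | case1 b t ih =>
    intro r hr
    simp only [List.foldl_cons, stepR_pair hr]
    exact ih r hr
  | case2 a b t hab ih =>
    intro r hr
    simp only [List.foldl_cons]
    exact ih (stepR r a) (stepR_chain hr a)
  | case3 l h => intro r _; rfl

-- a sweep that removes nothing certifies that no adjacent equal pair exists
theorem isChain_of_passOnce_eq : ∀ (l : List Char), passOnce l = l → l.IsChain (· ≠ ·) := by
  intro l
  fun_induction passOnce with
  | case1 b t ih =>
    intro h
    have hle := passOnce_length_le t
    have : (passOnce t).length = t.length + 2 := by rw [h]; simp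
    omega
  | case2 a b t hab ih =>
    intro h
    have h' : passOnce (b :: t) = b :: t := by simpa using h
    exact List.isChain_cons_cons.mpr ⟨hab, ih h'⟩
  | case3 l h =>
    intro _
    match l, h with
    | [], _ => exact List.isChain_nil
    | [a], _ => exact List.isChain_singleton a
    | a :: b :: t, hx => exact (hx a b t rfl).elim

-- a sweep preserving the length removes nothing
theorem passOnce_eq_of_length : ∀ (l : List Char), (passOnce l).length = l.length → passOnce l = l := by
  intro l
  fun_induction passOnce with
  | case1 b t ih =>
    intro h
    have := passOnce_length_le t
    simp at h; omega
  | case2 a b t hab ih =>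
    intro h
    simp only [List.length_cons, Nat.add_right_cancel_iff] at h
    rw [ih h]
  | case3 l h => intro _; rfl

-- iterating sweeps does not change the stack fold from the empty stack
theorem foldR_reduceAll (l : List Char) : (reduceAll l).foldl stepR [] = l.foldl stepR [] := by
  rw [reduceAll]
  split
  · rfl
  · next h =>
    rw [foldR_reduceAll (passOnce l)]
    exact (foldR_passOnce l [] List.isChain_nil).symm
termination_by l.length
decreasing_by
  have := passOnce_length_le l; omega

-- the final string of B contains no adjacent equal pair
theorem isChain_reduceAll (l : List Char) : (reduceAll l).IsChain (· ≠ ·) := by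
  rw [reduceAll]
  split
  · next h => exact isChain_of_passOnce_eq l (passOnce_eq_of_length l h)
  · next h => exact isChain_reduceAll (passOnce l)
termination_by l.length
decreasing_by
  have := passOnce_length_le l; omega

-- a pair-free string folds to its own reverse (over a compatible stack)
theorem foldR_noPair : ∀ (l r : List Char), l.IsChain (· ≠ ·) →
    (l = [] ∨ r = [] ∨ l.head? ≠ r.head?) → l.foldl stepR r = l.reverse ++ r := by
  intro l
  induction l with
  | nil => intro r _ _; simp
  | cons a t ih =>
    intro r hchain hcomp
    have hstep : stepR r a = a :: r := by
      cases r with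
      | nil => simp [stepR]
      | cons h rt =>
        have : a ≠ h := by
          rcases hcomp with h1 | h2 | h3
          · exact absurd h1 (by simp)
          · exact absurd h2 (by simp)
          · simpa using h3
        simp [stepR, this]
    have hside : t = [] ∨ a :: r = [] ∨ t.head? ≠ (a :: r).head? := by
      match t with
      | [] => exact Or.inl rfl
      | b :: t2 =>
        have : a ≠ b := List.rel_of_isChain_cons_cons hchain
        exact Or.inr (Or.inr (by simp [Ne.symm this]))
    simp only [List.foldl_cons, hstep]
    rw [ih (a :: r) hchain.tail hside]
    simp

-- emptiness of A's stack equals emptiness of B's residue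
theorem fold_empty_iff (l : List Char) : l.foldl stepR [] = [] ↔ reduceAll l = [] := by
  have h1 := foldR_reduceAll l
  have h2 := foldR_noPair (reduceAll l) [] (isChain_reduceAll l) (Or.inr (Or.inl rfl))
  constructor
  · intro h
    rw [← h1, h2] at h
    simpa using h
  · intro h
    rw [← h1, h, ]
    simp

-- ===== VERDICT (by name: the statement is the Claim_ definition above) =====
theorem solution_spec : Claim_equal_solution := by
  intro s _
  unfold Spec_solution solution solution_alt
  have hA : s.toList.foldl stepA [] = (s.toList.foldl stepR []).reverse := by
    have := foldA_eq_foldR s.toList []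
    simpa using this
  have hiff := fold_empty_iff s.toList
  by_cases h : reduceAll s.toList = []
  · have : s.toList.foldl stepA [] = [] := by
      rw [hA, hiff.mpr h]; rfl
    simp [this, h]
  · have hne : s.toList.foldl stepR [] ≠ [] := fun hc => h (hiff.mp hc)
    have : s.toList.foldl stepA [] ≠ [] := by
      rw [hA]; simpa using hne
    simp [this, h]
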